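-- pv_equiv track=rewrite | github.com/AnniePawl/Anna-Interview-Prep | Extra_Practice/last_two_bits.py | last_two_bits
-- ===== SOURCE A (Python) =====
-- def last_two_bits(num):
--   bits = []
--   while num > 0:
--     if num % 2 == 0:
--       bits.append(0)
--       num = num // 2
--     else:
--       bits.append(1)
--       num = num // 2
--   return bits[::-1][-2:]
-- ===== SOURCE B (Python) =====
-- def last_two_bits(num):
--     # Closed-form extraction of the two least-significant bits (high bit first),
--     # no binary-conversion loop.
--     if num <= 0:
--         return []
--     if num == 1:
--         return [1]
--     return [(num // 2) % 2, num % 2]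
-- ===== Notes on version B (the rewrite author's own statement) =====
-- stated objective: simpler
-- what changed: B returns the two least-significant bits by a closed-form arithmetic extraction ((num//2)%2 and num%2) instead of building the whole binary expansion in a loop, reversing it and slicing the last two entries.
import Mathlib
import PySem

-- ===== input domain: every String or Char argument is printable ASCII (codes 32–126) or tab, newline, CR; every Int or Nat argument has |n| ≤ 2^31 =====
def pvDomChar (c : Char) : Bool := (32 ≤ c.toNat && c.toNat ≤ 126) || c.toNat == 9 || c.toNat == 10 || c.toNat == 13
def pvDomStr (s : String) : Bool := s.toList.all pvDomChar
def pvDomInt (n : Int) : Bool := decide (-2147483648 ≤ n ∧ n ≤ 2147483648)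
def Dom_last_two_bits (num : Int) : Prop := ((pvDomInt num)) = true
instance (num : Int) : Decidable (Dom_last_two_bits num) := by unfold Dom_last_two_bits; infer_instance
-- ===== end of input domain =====

-- B replaces A's full binary-expansion loop + reverse + slice by a closed-form
-- extraction of the two least-significant bits; return values proved equal.

-- ===== PORT A =====
-- the while loop: append the bit (via the two branches) and floor-divide, while num > 0
def lastTwoBitsLoop (num : Int) (bits : List Int) : List Int :=
  if h : num > 0 then
    if PySem.Int.mod num 2 = 0 then
      lastTwoBitsLoop (PySem.Int.floordiv num 2) (bits ++ [0])
    else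
      lastTwoBitsLoop (PySem.Int.floordiv num 2) (bits ++ [1])
  else bits
termination_by num.toNat
decreasing_by
  all_goals
    rw [PySem.Int.floordiv_eq_ediv_of_pos (by norm_num)]
    omega

def last_two_bits (num : Int) : List Int :=
  -- bits[::-1][-2:]
  PySem.List.slice ((PySem.List.slice? (lastTwoBitsLoop num []) none none (-1)).getD [])
    (some (-2)) none

-- ===== PORT B =====
def last_two_bits_alt (num : Int) : List Int :=
  if num ≤ 0 then []
  else if num = 1 then [1]
  else [PySem.Int.mod (PySem.Int.floordiv num 2) 2, PySem.Int.mod num 2]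

-- ===== PRECONDITION & SPEC =====
def Spec_last_two_bits (num : Int) (out : List Int) : Prop := out = last_two_bits_alt num
instance (num : Int) (out : List Int) : Decidable (Spec_last_two_bits num out) := by unfold Spec_last_two_bits; infer_instance

-- ===== CLAIM (what is proved, stated in full; the proofs are below) =====
def Claim_equal_last_two_bits : Prop := ∀ (num : Int), Dom_last_two_bits num → Spec_last_two_bits num (last_two_bits num)

-- ===== LEMMAS AND PROOFS =====

-- the accumulator is only ever a prefix of the result
theorem lastTwoBitsLoop_acc (num : Int) (bits : List Int) :
    lastTwoBitsLoop num bits = bits ++ lastTwoBitsLoop num [] := by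
  generalize hk : num.toNat = k
  induction k using Nat.strong_induction_on generalizing num bits with
  | _ k ih =>
    conv_lhs => rw [lastTwoBitsLoop]
    conv_rhs => rw [lastTwoBitsLoop]
    by_cases h : num > 0
    · have hlt : (PySem.Int.floordiv num 2).toNat < k := by
        rw [PySem.Int.floordiv_eq_ediv_of_pos (by norm_num)]; omega
      rw [dif_pos h, dif_pos h]
      by_cases hm : PySem.Int.mod num 2 = 0
      · rw [if_pos hm, if_pos hm,
            ih _ hlt _ (bits ++ [0]) rfl, ih _ hlt _ ([] ++ [0]) rfl]
        simp
      · rw [if_neg hm, if_neg hm,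
            ih _ hlt _ (bits ++ [1]) rfl, ih _ hlt _ ([] ++ [1]) rfl]
        simp
    · simp [h]

-- one unfolding step for positive num: the loop conses num % 2 (LSB first)
theorem lastTwoBitsLoop_pos (num : Int) (h : num > 0) :
    lastTwoBitsLoop num [] =
      PySem.Int.mod num 2 :: lastTwoBitsLoop (PySem.Int.floordiv num 2) [] := by
  conv_lhs => rw [lastTwoBitsLoop]
  rw [dif_pos h]
  by_cases hm : PySem.Int.mod num 2 = 0
  · rw [if_pos hm, lastTwoBitsLoop_acc, hm]
    simp
  · have h1 : PySem.Int.mod num 2 = 1 := by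
      have := PySem.Int.mod_nonneg num (b := 2) (by norm_num)
      have := PySem.Int.mod_lt num (b := 2) (by norm_num)
      omega
    rw [if_neg hm, lastTwoBitsLoop_acc, h1]
    simp

theorem lastTwoBitsLoop_nonpos (num : Int) (h : ¬ num > 0) :
    lastTwoBitsLoop num [] = [] := by
  rw [lastTwoBitsLoop]; simp [h]

-- ===== VERDICT (by name: the statement is the Claim_ definition above) =====
theorem last_two_bits_spec : Claim_equal_last_two_bits := by
  intro num _
  unfold Spec_last_two_bits last_two_bits last_two_bits_alt
  rw [PySem.List.slice?_none_none_neg_one, Option.getD_some]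
  by_cases h0 : num ≤ 0
  · rw [lastTwoBitsLoop_nonpos num (by omega)]
    simp [h0, PySem.List.slice]
  · by_cases h1 : num = 1
    · subst h1
      rw [lastTwoBitsLoop_pos 1 (by norm_num)]
      rw [lastTwoBitsLoop_nonpos (PySem.Int.floordiv 1 2)
        (by rw [PySem.Int.floordiv_eq_ediv_of_pos (by norm_num)]; omega)]
      have hm1 : PySem.Int.mod 1 2 = 1 := by
        rw [PySem.Int.mod_eq_emod_of_pos (by norm_num)]; decide
      rw [hm1, PySem.List.slice_from_neg_ofNat _ 2 (by omega)]
      simp [h0]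
    · -- num ≥ 2: the loop is m0 :: m1 :: rest, reversed its last two are [m1, m0]
      have h2 : 2 ≤ num := by omega
      have hq : (1:Int) ≤ PySem.Int.floordiv num 2 := by
        rw [PySem.Int.floordiv_eq_ediv_of_pos (by norm_num)]; omega
      rw [lastTwoBitsLoop_pos num (by omega),
          lastTwoBitsLoop_pos (PySem.Int.floordiv num 2) (by omega)]
      rw [PySem.List.slice_from_neg_ofNat _ 2 (by omega)]
      have key : ∀ (r : List Int) (a b : Int),
          ((r ++ [a]) ++ [b]).drop (((r ++ [a]) ++ [b]).length - 2) = [a, b] := by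
        intro r a b
        have hl : ((r ++ [a]) ++ [b]).length - 2 = r.length := by simp
        rw [hl, List.append_assoc, List.drop_left]
        simp
      simp only [List.reverse_cons]
      rw [key]
      simp [h0, h1]
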